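-- pv_equiv track=rewrite | github.com/SyedEbad902/random-programming | ques03.py | count_favourite_singers
-- ===== SOURCE A (Python) =====
-- def count_favourite_singers(songs):
--     # Dictionary to store the count of songs for each singer
--     singer_counts = {}
--
--     # Count the number of songs for each singer
--     for singer in songs:
--         if singer in singer_counts:
--             singer_counts[singer] += 1
--         else:
--             singer_counts[singer] = 1
--
--     # Find the maximum number of songs any singer has
--     max_songs = max(singer_counts.values())
--
--     # Count the number of singers with the maximum number of songs
--     favourite_singers_count = sum(1 for count in singer_counts.values() if count == max_songs)
--
--     return favourite_singers_count
-- ===== SOURCE B (Python) =====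
-- def count_favourite_singers(songs):
--     # One streaming pass: maintain per-singer counts plus the running maximum
--     # count and the number of singers currently at that maximum.
--     counts = {}
--     best = 0
--     ties = 0
--     for s in songs:
--         c = counts.get(s, 0) + 1
--         counts[s] = c
--         if c > best:
--             best = c
--             ties = 1
--         elif c == best:
--             ties += 1
--     return ties
-- ===== Notes on version B (the rewrite author's own statement) =====
-- stated objective: alternative
-- what changed: A builds the counts dict and then makes two more passes over its values (max, then a filtering sum); B is a single streaming pass that updates the running maximum count and the number of singers tied at it while counting, so the max() and sum() passes disappear.
-- outside the precondition, e.g. on count_favourite_singers([]): A raises ValueError, B returns 0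
import Mathlib
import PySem

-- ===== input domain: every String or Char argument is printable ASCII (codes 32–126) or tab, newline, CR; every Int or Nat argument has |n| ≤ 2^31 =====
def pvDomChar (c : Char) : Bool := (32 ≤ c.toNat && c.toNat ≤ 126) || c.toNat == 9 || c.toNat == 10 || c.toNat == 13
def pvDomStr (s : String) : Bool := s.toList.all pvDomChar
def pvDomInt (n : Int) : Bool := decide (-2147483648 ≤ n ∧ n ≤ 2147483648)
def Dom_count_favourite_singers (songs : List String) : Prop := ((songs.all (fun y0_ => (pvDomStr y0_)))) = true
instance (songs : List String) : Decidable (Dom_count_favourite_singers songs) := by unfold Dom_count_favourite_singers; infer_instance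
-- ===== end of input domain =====

-- B replaces A's three passes (count dict, max(), filtering sum) with one streaming pass
-- that tracks the running maximum count and the number of singers tied at it (alternative
-- decomposition, same O(n) cost).

-- ===== PORT A =====
def count_favourite_singers (songs : List String) : Int :=
  let singer_counts :=
    songs.foldl
      (fun d singer =>
        if d.contains singer then d.modify singer 0 (· + 1) else d.insert singer 1)
      (PySem.Dict.empty : PySem.Dict String Int)
  -- max(singer_counts.values()); none = ValueError on the empty dict, excluded by Pre_
  match PySem.List.max? singer_counts.values (fun v => v) with
  | none => 0
  | some max_songs =>
      ((singer_counts.values.countP (fun count => count == max_songs) : Nat) : Int)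

-- ===== PORT B =====
def count_favourite_singers_alt (songs : List String) : Int :=
  let st :=
    songs.foldl
      (fun (st : PySem.Dict String Int × Int × Int) s =>
        let counts := st.1
        let best := st.2.1
        let ties := st.2.2
        let c := counts.getD s 0 + 1
        let counts' := counts.insert s c
        if c > best then (counts', c, 1)
        else if c = best then (counts', best, ties + 1)
        else (counts', best, ties))
      (PySem.Dict.empty, 0, 0)
  st.2.2

-- ===== PRECONDITION & SPEC =====
-- Pre_ excludes exactly the empty list, on which A's max([]) raises ValueError (B returns 0 there).
def Pre_count_favourite_singers (songs : List String) : Prop := songs ≠ []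
instance (songs : List String) : Decidable (Pre_count_favourite_singers songs) := by
  unfold Pre_count_favourite_singers; infer_instance
def pvWitness_count_favourite_singers : List String := ["a", "b", "a"]

def Spec_count_favourite_singers (songs : List String) (out : Int) : Prop :=
  out = count_favourite_singers_alt songs
instance (songs : List String) (out : Int) : Decidable (Spec_count_favourite_singers songs out) := by
  unfold Spec_count_favourite_singers; infer_instance

-- ===== CLAIM (what is proved, stated in full; the proofs are below) =====
def Claim_equal_count_favourite_singers : Prop :=
  ∀ (songs : List String), Dom_count_favourite_singers songs →
    Pre_count_favourite_singers songs →
    Spec_count_favourite_singers songs (count_favourite_singers songs)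

-- ===== LEMMAS AND PROOFS =====

-- B's loop invariant: the dict has distinct keys and positive values, `b` is the maximum
-- value (0 when the dict is empty), and `t` is how many values equal `b`.
def InvCFS (d : PySem.Dict String Int) (b t : Int) : Prop :=
  d.keys.Nodup ∧
  (∀ v ∈ d.values, 1 ≤ v ∧ v ≤ b) ∧
  (d.values = [] → b = 0) ∧
  (d.values ≠ [] → b ∈ d.values) ∧
  t = (d.values.count b : Int)

-- value list of an in-place overwrite of key s with value c, at the items level
def vUpd (s : String) (c : Int) (p : String × Int) : Int := if p.1 == s then c else p.2

lemma map_vUpd_of_not_mem (s : String) (c : Int) (l : List (String × Int))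
    (h : s ∉ l.map Prod.fst) : l.map (vUpd s c) = l.map Prod.snd := by
  induction l with
  | nil => rfl
  | cons p tl ih =>
    simp only [List.mem_cons, List.map] at h ⊢
    have h1 : p.1 ≠ s := fun hp => h (Or.inl hp.symm)
    rw [ih (fun hm => h (Or.inr hm))]
    simp [vUpd, h1]

lemma count_map_vUpd (s : String) (v c x : Int) (l : List (String × Int))
    (hnd : (l.map Prod.fst).Nodup) (hm : (s, v) ∈ l) :
    (l.map (vUpd s c)).count x + (if v = x then 1 else 0)
      = (l.map Prod.snd).count x + (if c = x then 1 else 0) := by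
  induction l with
  | nil => cases hm
  | cons p tl ih =>
    simp only [List.map_cons, List.nodup_cons] at hnd
    rcases List.mem_cons.mp hm with hp | hp
    · subst hp
      have htl : s ∉ tl.map Prod.fst := by simpa using hnd.1
      simp only [List.map_cons, List.count_cons, map_vUpd_of_not_mem s c tl htl]
      have hsv : vUpd s c (s, v) = c := by simp [vUpd]
      rw [hsv]
      simp only [beq_iff_eq]
      split_ifs <;> omega
    · have h1 : p.1 ≠ s := by
        intro he
        exact hnd.1 (he ▸ (List.mem_map.mpr ⟨(s, v), hp, rfl⟩))
      have hcount := ih hnd.2 hp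
      have hup : vUpd s c p = p.2 := by simp [vUpd, h1]
      simp only [List.map_cons, List.count_cons, hup]
      split_ifs at hcount ⊢ <;> omega

lemma mem_map_vUpd_self (s : String) (v c : Int) (l : List (String × Int))
    (hm : (s, v) ∈ l) : c ∈ l.map (vUpd s c) :=
  List.mem_map.mpr ⟨(s, v), hm, by simp [vUpd]⟩

lemma mem_map_vUpd_of_ne (s : String) (v c x : Int) (l : List (String × Int))
    (hnd : (l.map Prod.fst).Nodup) (hm : (s, v) ∈ l)
    (hx : x ∈ l.map Prod.snd) (hxv : x ≠ v) : x ∈ l.map (vUpd s c) := by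
  rcases List.mem_map.mp hx with ⟨p, hp, hps⟩
  have h1 : p.1 ≠ s := by
    intro he
    have hpe : p = (s, v) := List.inj_on_of_nodup_map hnd hp hm he
    exact hxv (by rw [← hps, hpe])
  exact List.mem_map.mpr ⟨p, hp, by simp [vUpd, h1, hps]⟩

lemma ub_map_vUpd (s : String) (c x : Int) (l : List (String × Int))
    (hx : x ∈ l.map (vUpd s c)) : x = c ∨ x ∈ l.map Prod.snd := by
  rcases List.mem_map.mp hx with ⟨p, hp, hps⟩
  by_cases h1 : (p.1 == s) = true
  · left; simp [vUpd, h1] at hps; omega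
  · right
    exact List.mem_map.mpr ⟨p, hp, by simp [vUpd, h1] at hps ⊢; exact hps⟩

lemma values_insert_of_contains (d : PySem.Dict String Int) (s : String) (c : Int)
    (h : d.contains s = true) :
    (d.insert s c).values = d.items.map (vUpd s c) := by
  show ((d.insert s c).items).map Prod.snd = _
  rw [PySem.Dict.items_insert_of_contains d c h, List.map_map]
  refine List.map_congr_left (fun p _ => ?_)
  by_cases hp : (p.1 == s) = true <;> simp [Function.comp, vUpd, hp]

lemma values_insert_of_not_contains (d : PySem.Dict String Int) (s : String) (c : Int)
    (h : d.contains s = false) :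
    (d.insert s c).values = d.values ++ [c] := by
  show ((d.insert s c).items).map Prod.snd = _
  rw [PySem.Dict.items_insert_of_not_contains d c h]
  simp [PySem.Dict.values]

-- one step of B's loop preserves the invariant
lemma InvCFS_step (d : PySem.Dict String Int) (b t : Int) (s : String)
    (h : InvCFS d b t) :
    InvCFS (d.insert s (d.getD s 0 + 1))
      (if b < d.getD s 0 + 1 then d.getD s 0 + 1 else b)
      (if b < d.getD s 0 + 1 then 1
       else if d.getD s 0 + 1 = b then t + 1 else t) := by
  obtain ⟨hnd, hpos, hemp, hmem, ht⟩ := h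
  set c := d.getD s 0 + 1 with hc
  have hnd' : (d.insert s c).keys.Nodup := PySem.Dict.nodup_keys_insert d s c hnd
  by_cases hcont : d.contains s = true
  · -- s already present with value c - 1
    obtain ⟨v, hv⟩ : ∃ v, d.get? s = some v := by
      rcases hx : d.get? s with _ | v
      · rw [PySem.Dict.contains_eq_isSome_get?, hx] at hcont; simp at hcont
      · exact ⟨v, rfl⟩
    have hvc : c = v + 1 := by
      rw [hc, PySem.Dict.getD_eq_get?_getD, hv]; rfl
    have hitems : (s, v) ∈ d.items := PySem.Dict.mem_items_of_get?_eq_some d hv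
    have hvval : v ∈ d.values := List.mem_map.mpr ⟨(s, v), hitems, rfl⟩
    have hvpos := hpos v hvval
    have hndf : (d.items.map Prod.fst).Nodup := hnd
    have hV : (d.insert s c).values = d.items.map (vUpd s c) :=
      values_insert_of_contains d s c hcont
    have hvalues : d.values = d.items.map Prod.snd := rfl
    have hub : ∀ x ∈ (d.insert s c).values, x = c ∨ x ∈ d.values := by
      intro x hx; rw [hV] at hx
      rcases ub_map_vUpd s c x d.items hx with h1 | h1
      · exact Or.inl h1
      · exact Or.inr (hvalues ▸ h1)
    have hcmem : c ∈ (d.insert s c).values := by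
      rw [hV]; exact mem_map_vUpd_self s v c d.items hitems
    have hVne : (d.insert s c).values ≠ [] := fun he => by
      rw [he] at hcmem; cases hcmem
    refine ⟨hnd', ?_, fun he => absurd he hVne, fun _ => ?_, ?_⟩
    · intro x hx
      rcases hub x hx with h1 | h1
      · constructor
        · omega
        · split <;> omega
      · have := hpos x h1
        constructor
        · omega
        · split <;> omega
    · -- the new maximum is in the values
      by_cases hlt : b < c
      · rw [if_pos hlt]; exact hcmem
      · have hbne : b ≠ v := by omega
        have hbv : b ∈ d.values := hmem (fun he => by
          rw [he] at hvval; cases hvval)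
        rw [if_neg hlt, hV]
        exact mem_map_vUpd_of_ne s v c b d.items hndf hitems (hvalues ▸ hbv) hbne
    · -- the tie count
      rw [hV]
      by_cases hlt : b < c
      · -- new max c: every old value ≤ b < c, so old count of c is 0
        have hcount := count_map_vUpd s v c c d.items hndf hitems
        have hzero : (d.items.map Prod.snd).count c = 0 := by
          rw [List.count_eq_zero]
          intro hcin
          have := hpos c (hvalues ▸ hcin)
          omega
        rw [if_pos hlt, if_pos hlt]
        have hvnec : ¬ (v = c) := by omega
        rw [if_neg hvnec, if_pos rfl, hzero] at hcount
        omega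
      · rw [if_neg hlt, if_neg hlt]
        have hcount := count_map_vUpd s v c b d.items hndf hitems
        have hvneb : ¬ (v = b) := by omega
        rw [if_neg hvneb] at hcount
        by_cases heq : c = b
        · rw [if_pos heq, ht]
          rw [if_pos heq] at hcount
          rw [hvalues]
          omega
        · rw [if_neg heq, ht]
          rw [if_neg heq] at hcount
          rw [hvalues]
          omega
  · -- s is new: c = 1, values gain a 1 at the end
    have hcont' : d.contains s = false := by simpa using hcont
    have hc1 : c = 1 := by
      rw [hc, PySem.Dict.getD_of_not_contains d 0 hcont']
      ring
    have hV : (d.insert s c).values = d.values ++ [c] :=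
      values_insert_of_not_contains d s c hcont'
    refine ⟨hnd', ?_, ?_, fun _ => ?_, ?_⟩
    · intro x hx
      rw [hV, List.mem_append] at hx
      rcases hx with h1 | h1
      · have := hpos x h1
        constructor
        · omega
        · split <;> omega
      · simp at h1
        constructor
        · omega
        · split <;> omega
    · intro he; rw [hV] at he; simp at he
    · rw [hV]
      by_cases hlt : b < c
      · rw [if_pos hlt, List.mem_append]
        right; simp
      · have hbv : b ∈ d.values := by
          apply hmem
          intro he
          have := hemp he
          omega
        rw [if_neg hlt, List.mem_append]
        exact Or.inl hbv
    · rw [hV, List.count_append]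
      by_cases hlt : b < c
      · -- c = 1 and b < 1 forces the old dict empty
        have hVnil : d.values = [] := by
          by_contra he
          have := hpos b (hmem he)
          omega
        rw [if_pos hlt, if_pos hlt, hVnil, hc1]
        simp
      · rw [if_neg hlt, if_neg hlt]
        by_cases heq : c = b
        · rw [if_pos heq, ht, heq]
          simp
        · rw [if_neg heq, ht]
          have h0 : ([c].count b) = 0 := by
            simp [List.count_singleton]
            omega
          rw [h0]
          omega

-- B's fold keeps the invariant and its dict component is the plain counting fold
lemma foldB (l : List String) :
    ∀ (d : PySem.Dict String Int) (b t : Int), InvCFS d b t →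
      InvCFS (l.foldl
          (fun (st : PySem.Dict String Int × Int × Int) s =>
            let counts := st.1
            let best := st.2.1
            let ties := st.2.2
            let c := counts.getD s 0 + 1
            let counts' := counts.insert s c
            if c > best then (counts', c, 1)
            else if c = best then (counts', best, ties + 1)
            else (counts', best, ties))
          (d, b, t)).1
        (l.foldl
          (fun (st : PySem.Dict String Int × Int × Int) s =>
            let counts := st.1
            let best := st.2.1
            let ties := st.2.2
            let c := counts.getD s 0 + 1
            let counts' := counts.insert s c
            if c > best then (counts', c, 1)
            else if c = best then (counts', best, ties + 1)
            else (counts', best, ties))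
          (d, b, t)).2.1
        (l.foldl
          (fun (st : PySem.Dict String Int × Int × Int) s =>
            let counts := st.1
            let best := st.2.1
            let ties := st.2.2
            let c := counts.getD s 0 + 1
            let counts' := counts.insert s c
            if c > best then (counts', c, 1)
            else if c = best then (counts', best, ties + 1)
            else (counts', best, ties))
          (d, b, t)).2.2 ∧
      (l.foldl
          (fun (st : PySem.Dict String Int × Int × Int) s =>
            let counts := st.1
            let best := st.2.1
            let ties := st.2.2
            let c := counts.getD s 0 + 1
            let counts' := counts.insert s c
            if c > best then (counts', c, 1)
            else if c = best then (counts', best, ties + 1)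
            else (counts', best, ties))
          (d, b, t)).1
        = l.foldl (fun d s => d.insert s (d.getD s 0 + 1)) d := by
  induction l with
  | nil => intro d b t h; exact ⟨h, rfl⟩
  | cons s tl ih =>
    intro d b t h
    have hstep := InvCFS_step d b t s h
    simp only [List.foldl_cons]
    by_cases hlt : b < d.getD s 0 + 1
    · rw [if_pos hlt]
      rw [if_pos hlt, if_pos hlt] at hstep
      exact ih _ _ _ hstep
    · by_cases heq : d.getD s 0 + 1 = b
      · rw [if_neg hlt, if_pos heq]
        rw [if_neg hlt, if_neg hlt, if_pos heq] at hstep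
        exact ih _ _ _ hstep
      · rw [if_neg hlt, if_neg heq]
        rw [if_neg hlt, if_neg hlt, if_neg heq] at hstep
        exact ih _ _ _ hstep

lemma empty_values_cfs : (PySem.Dict.empty : PySem.Dict String Int).values = [] := rfl

lemma InvCFS_empty : InvCFS PySem.Dict.empty 0 0 := by
  refine ⟨?_, ?_, fun _ => rfl, fun h => absurd empty_values_cfs h, ?_⟩
  · show (List.map Prod.fst (PySem.Dict.empty : PySem.Dict String Int).items).Nodup
    exact List.nodup_nil
  · intro v hv; rw [empty_values_cfs] at hv; cases hv
  · rw [empty_values_cfs]; rfl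

-- A's dict-building step is B's
lemma astep_eq (d : PySem.Dict String Int) (s : String) :
    (if d.contains s then d.modify s 0 (· + 1) else d.insert s 1)
      = d.insert s (d.getD s 0 + 1) := by
  by_cases h : d.contains s = true
  · rw [if_pos h]; rfl
  · have h' : d.contains s = false := by simpa using h
    rw [if_neg (by simp [h']), PySem.Dict.getD_of_not_contains d 0 h']
    norm_num

-- ===== VERDICT (by name: the statement is the Claim_ definition above) =====
theorem count_favourite_singers_spec : Claim_equal_count_favourite_singers := by
  intro songs _ hne
  unfold Spec_count_favourite_singers count_favourite_singers count_favourite_singers_alt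
  have hdicts :
      songs.foldl (fun d singer =>
          if d.contains singer then d.modify singer 0 (· + 1) else d.insert singer 1)
        (PySem.Dict.empty : PySem.Dict String Int)
      = songs.foldl (fun d s => d.insert s (d.getD s 0 + 1))
          (PySem.Dict.empty : PySem.Dict String Int) := by
    apply PySem.List.foldl_congr_mem
    intro d s _
    exact astep_eq d s
  obtain ⟨hinv, hdict⟩ := foldB songs PySem.Dict.empty 0 0 InvCFS_empty
  obtain ⟨hnd, hpos, hemp, hmem, ht⟩ := hinv
  set F := songs.foldl
      (fun (st : PySem.Dict String Int × Int × Int) s =>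
        let counts := st.1
        let best := st.2.1
        let ties := st.2.2
        let c := counts.getD s 0 + 1
        let counts' := counts.insert s c
        if c > best then (counts', c, 1)
        else if c = best then (counts', best, ties + 1)
        else (counts', best, ties))
      (PySem.Dict.empty, 0, 0) with hF
  show (match PySem.List.max? (songs.foldl (fun d singer =>
          if d.contains singer then d.modify singer 0 (· + 1) else d.insert singer 1)
        (PySem.Dict.empty : PySem.Dict String Int)).values (fun v => v) with
    | none => (0 : Int)
    | some max_songs =>
        (((songs.foldl (fun d singer =>
          if d.contains singer then d.modify singer 0 (· + 1) else d.insert singer 1)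
        (PySem.Dict.empty : PySem.Dict String Int)).values.countP
            (fun count => count == max_songs) : Nat) : Int))
      = F.2.2
  rw [hdicts, ← hdict]
  have hVne : F.1.values ≠ [] := by
    rw [hdict, PySem.Dict.foldl_insert_getD_add_one_eq_counter]
    obtain ⟨x, tl, hsongs⟩ := List.exists_cons_of_ne_nil hne
    intro he
    have hx : x ∈ (PySem.Dict.counter songs : PySem.Dict String Int).keys := by
      rw [PySem.Dict.keys_counter]
      exact (PySem.Set.mem_ofList _ _).mpr (by rw [hsongs]; exact List.mem_cons_self)
    have hitems : (PySem.Dict.counter songs : PySem.Dict String Int).items = [] :=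
      List.map_eq_nil_iff.mp he
    have hx' : x ∈ ((PySem.Dict.counter songs : PySem.Dict String Int).items.map Prod.fst) := hx
    rw [hitems] at hx'
    cases hx'
  have hbF : F.2.1 ∈ F.1.values := hmem hVne
  rcases hv : F.1.values with _ | ⟨x, rest⟩
  · exact absurd hv hVne
  · rw [PySem.List.max?_id_cons]
    have hsome : PySem.List.max? (x :: rest) (fun v => v) = some (rest.foldl max x) :=
      PySem.List.max?_id_cons x rest
    have hmmem : rest.foldl max x ∈ (x :: rest) := PySem.List.max?_mem hsome
    have hmmax : ∀ y ∈ (x :: rest), y ≤ rest.foldl max x :=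
      fun y hy => PySem.List.max?_isMax hsome y hy
    have heqm : rest.foldl max x = F.2.1 := by
      apply le_antisymm
      · exact (hpos _ (hv ▸ hmmem)).2
      · exact hmmax _ (hv ▸ hbF)
    show (((x :: rest).countP (fun count => count == rest.foldl max x) : Nat) : Int) = F.2.2
    have hcnt : (x :: rest).countP (fun count => count == rest.foldl max x)
        = F.1.values.count F.2.1 := by
      rw [heqm, ← hv]
      rfl
    rw [hcnt, ← ht]
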